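-- pv_equiv track=rewrite | github.com/cs231907-oss/C_learning_gap_analyzer | C_learning_gap_analyzer.py | extract_fromat_printf_specifiers
-- ===== SOURCE A (Python) =====
-- def extract_fromat_printf_specifiers(line):
--     specs = []
--     in_string = False
--     buffer = ""
--
--     for char in line:
--         if char == '"':
--             in_string=not in_string
--             buffer=""
--             continue
--
--         if in_string:
--             buffer += char
--             if char=='d' and buffer.endswith('%d'):
--                 specs.append('%d')
--             if char=='p' and buffer.endswith('%p'):
--                 specs.append('%p')
--     return specs
-- ===== SOURCE B (Python) =====
-- def extract_fromat_printf_specifiers(line):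
--     specs = []
--     parts = line.split('"')
--     for k in range(1, len(parts), 2):
--         seg = parts[k]
--         i = 0
--         n = len(seg)
--         while i + 1 < n:
--             if seg[i] == '%' and seg[i + 1] in ('d', 'p'):
--                 specs.append(seg[i] + seg[i + 1])
--                 i += 2
--             else:
--                 i += 1
--     return specs
-- ===== Notes on version B (the rewrite author's own statement) =====
-- stated objective: idiomatic
-- what changed: Replaces the char-by-char in_string/buffer state machine by split-on-'"'-then-scan: the odd-indexed split segments are exactly the inside-string regions, and each is scanned once for non-overlapping %d/%p occurrences.
import Mathlib
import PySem

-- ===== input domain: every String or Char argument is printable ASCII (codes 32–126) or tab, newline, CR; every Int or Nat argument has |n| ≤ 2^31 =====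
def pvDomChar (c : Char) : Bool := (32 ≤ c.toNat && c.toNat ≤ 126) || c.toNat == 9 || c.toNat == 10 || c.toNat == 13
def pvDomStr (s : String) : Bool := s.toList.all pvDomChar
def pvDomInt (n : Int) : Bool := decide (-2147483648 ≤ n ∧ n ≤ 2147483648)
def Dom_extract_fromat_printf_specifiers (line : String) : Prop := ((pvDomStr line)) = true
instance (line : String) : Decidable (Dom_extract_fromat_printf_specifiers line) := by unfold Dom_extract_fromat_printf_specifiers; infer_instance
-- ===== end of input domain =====

-- B replaces A's char-by-char in_string/buffer state machine by split-on-'"'-then-scan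
-- (the odd-indexed split segments are the inside-string regions); alternative/idiomatic, same results.

-- ===== PORT A =====
-- The Python buffer is kept REVERSED here ('buffer += char' becomes 'char :: buffer'),
-- so buffer.endswith(pat) becomes 'pat reversed is a prefix of the stored list' — exact.
def pvRevEndsWith : List Char → List Char → Bool
  | _, [] => true
  | [], _ :: _ => false
  | b :: bs, p :: ps => b = p && pvRevEndsWith bs ps

-- one iteration of A's 'for char in line' loop over the state (specs, in_string, buffer)
def pvStepA (st : List String × Bool × List Char) (char : Char) : List String × Bool × List Char :=
  let (specs, in_string, buffer) := st
  if char = '"' then (specs, !in_string, [])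
  else if in_string then
    let buffer' := char :: buffer                -- buffer += char (reversed)
    let specs' := if char = 'd' && pvRevEndsWith buffer' ['d', '%'] then specs ++ ["%d"] else specs
    let specs'' := if char = 'p' && pvRevEndsWith buffer' ['p', '%'] then specs' ++ ["%p"] else specs'
    (specs'', in_string, buffer')
  else (specs, in_string, buffer)

def extract_fromat_printf_specifiers (line : String) : List String :=
  (line.toList.foldl pvStepA ([], false, [])).1

-- ===== PORT B =====
-- line.split('"'), ported by hand for the one-character separator '"' (exact for this call)
def pvSplitQ : List Char → List (List Char)
  | [] => [[]]
  | c :: cs =>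
    if c = '"' then [] :: pvSplitQ cs
    else
      match pvSplitQ cs with
      | [] => [[c]]            -- unreachable: pvSplitQ never returns []
      | s :: ss => (c :: s) :: ss

-- parts[1::2]: the segments at odd indices, in order ('for k in range(1, len(parts), 2)')
def pvOdds : List (List Char) → List (List Char)
  | _ :: b :: rest => b :: pvOdds rest
  | _ => []

-- B's inner while loop: left-to-right non-overlapping scan for '%d'/'%p'
-- (the i/i+1 index scan, transcribed as structural recursion on the character list)
def pvScan : List Char → List String
  | '%' :: c :: rest =>
    if c = 'd' ∨ c = 'p' then String.ofList ['%', c] :: pvScan rest else pvScan (c :: rest)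
  | _ :: rest => pvScan rest
  | [] => []

def extract_fromat_printf_specifiers_alt (line : String) : List String :=
  (pvOdds (pvSplitQ line.toList)).foldl (fun specs seg => specs ++ pvScan seg) []

-- ===== PRECONDITION & SPEC =====
def Spec_extract_fromat_printf_specifiers (line : String) (out : List String) : Prop := out = extract_fromat_printf_specifiers_alt line
instance (line : String) (out : List String) : Decidable (Spec_extract_fromat_printf_specifiers line out) := by unfold Spec_extract_fromat_printf_specifiers; infer_instance

-- ===== CLAIM (what is proved, stated in full; the proofs are below) =====
def Claim_equal_extract_fromat_printf_specifiers : Prop := ∀ (line : String), Dom_extract_fromat_printf_specifiers line → Spec_extract_fromat_printf_specifiers line (extract_fromat_printf_specifiers line)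

-- ===== LEMMAS AND PROOFS =====

-- reference state machine: pvOutS = outside a string, pvInS p = inside one, p ⇔ previous char was '%'
mutual
def pvOutS : List Char → List String
  | [] => []
  | c :: cs => if c = '"' then pvInS false cs else pvOutS cs

def pvInS (p : Bool) : List Char → List String
  | [] => []
  | c :: cs =>
    if c = '"' then pvOutS cs
    else (if p ∧ (c = 'd' ∨ c = 'p') then [String.ofList ['%', c]] else []) ++ pvInS (c = '%') cs
end

theorem pvRevEndsWith_single (buf : List Char) (x : Char) :
    pvRevEndsWith buf [x] = decide (buf.head? = some x) := by
  cases buf <;> simp [pvRevEndsWith]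

-- A's fold is the reference state machine (only the head of the reversed buffer matters)
theorem pvLoopA_spec (cs : List Char) : ∀ (specs : List String) (b : Bool) (buf : List Char),
    (cs.foldl pvStepA (specs, b, buf)).1 =
      specs ++ (if b then pvInS (buf.head? = some '%') cs else pvOutS cs) := by
  induction cs with
  | nil => intro specs b buf; cases b <;> simp [pvOutS, pvInS]
  | cons c cs ih =>
    intro specs b buf
    by_cases hq : c = '"'
    · subst hq
      cases b <;> simp [List.foldl_cons, pvStepA, pvOutS, pvInS, ih]
    · cases b with
      | false => simp [List.foldl_cons, pvStepA, hq, pvOutS, ih]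
      | true =>
        simp only [List.foldl_cons, pvStepA, if_neg hq, pvRevEndsWith, pvRevEndsWith_single]
        rw [ih]
        simp only [pvInS, if_neg hq]
        by_cases hd : c = 'd'
        · subst hd
          by_cases hp : buf.head? = some '%' <;> simp [hp, List.append_assoc]
        · by_cases hp' : c = 'p'
          · subst hp'
            by_cases hp : buf.head? = some '%' <;> simp [hp, List.append_assoc]
          · by_cases hp : buf.head? = some '%' <;> simp [hp, hd, hp']

theorem pvSplitQ_ne_nil (cs : List Char) : pvSplitQ cs ≠ [] := by
  cases cs with
  | nil => simp [pvSplitQ]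
  | cons c cs =>
    simp only [pvSplitQ]
    split
    · simp
    · split <;> simp

theorem pvOdds_cons_irrel (x y : List Char) (l : List (List Char)) :
    pvOdds (x :: l) = pvOdds (y :: l) := by
  cases l <;> rfl

theorem pvScan_cons_ne (c : Char) (h : ¬ c = '%') (s : List Char) :
    pvScan (c :: s) = pvScan s := by
  cases s <;> simp [pvScan, h]

-- the reference state machine is the split-then-scan computation
theorem pvSplit_spec (cs : List Char) :
    pvOutS cs = (pvOdds (pvSplitQ cs)).flatMap pvScan ∧
    ∀ p : Bool, pvInS p cs =
      (if p then pvScan ('%' :: (pvSplitQ cs).headD []) else pvScan ((pvSplitQ cs).headD [])) ++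
      (pvOdds (pvSplitQ cs).tail).flatMap pvScan := by
  induction cs with
  | nil =>
    constructor
    · simp [pvOutS, pvSplitQ, pvOdds]
    · intro p; cases p <;> simp [pvInS, pvSplitQ, pvOdds, pvScan]
  | cons c cs ih =>
    obtain ⟨iho, ihi⟩ := ih
    obtain ⟨s, ss, hsplit⟩ : ∃ s ss, pvSplitQ cs = s :: ss := by
      cases h : pvSplitQ cs with
      | nil => exact absurd h (pvSplitQ_ne_nil cs)
      | cons s ss => exact ⟨s, ss, rfl⟩
    by_cases hq : c = '"'
    · subst hq
      have hsp : pvSplitQ ('"' :: cs) = [] :: s :: ss := by simp [pvSplitQ, hsplit]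
      constructor
      · have := ihi false
        simp only [hsplit] at this
        simp [pvOutS, hsp, pvOdds, this]
      · intro p
        simp only [pvInS, hsp, List.headD_cons, List.tail_cons, iho, hsplit]
        cases p <;> simp [pvScan]
    · have hsp : pvSplitQ (c :: cs) = (c :: s) :: ss := by simp [pvSplitQ, hq, hsplit]
      constructor
      · simp only [pvOutS, if_neg hq, iho, hsplit, hsp]
        rw [pvOdds_cons_irrel s (c :: s) ss]
      · intro p
        have hrec := ihi (decide (c = '%'))
        simp only [hsplit, List.headD_cons, List.tail_cons] at hrec
        simp only [pvInS, if_neg hq, hsp, List.headD_cons, List.tail_cons, hrec]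
        by_cases hc : c = '%'
        · subst hc
          cases p <;> simp [pvScan]
        · by_cases hd : c = 'd'
          · subst hd
            cases p <;> simp [pvScan, pvScan_cons_ne _ hc]
          · by_cases hp' : c = 'p'
            · subst hp'
              cases p <;> simp [pvScan, pvScan_cons_ne _ hc]
            · cases p <;>
                simp [pvScan_cons_ne _ hc, pvScan, hd, hp', hc]

-- B's foldl-with-extend is the flatMap over the segments
theorem pvFoldlAppend (l : List (List Char)) : ∀ acc : List String,
    l.foldl (fun specs seg => specs ++ pvScan seg) acc = acc ++ l.flatMap pvScan := by
  induction l with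
  | nil => simp
  | cons a l ih => intro acc; simp [List.foldl_cons, ih, List.flatMap_cons]

-- ===== VERDICT (by name: the statement is the Claim_ definition above) =====
theorem extract_fromat_printf_specifiers_spec : Claim_equal_extract_fromat_printf_specifiers := by
  intro line _
  unfold Spec_extract_fromat_printf_specifiers
  unfold extract_fromat_printf_specifiers extract_fromat_printf_specifiers_alt
  rw [pvLoopA_spec, pvFoldlAppend]
  simp [(pvSplit_spec line.toList).1]
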